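-- pv_equiv track=rewrite | github.com/Joseph-Chou911/fred-cache | scripts/backtest_tw0050_leverage_mvp.py | build_entry_forbidden_mask
-- ===== SOURCE A (Python) =====
-- from typing import Any, Dict, List, Optional, Tuple
--
-- def build_entry_forbidden_mask(
--     n: int,
--     breaks: List[Dict[str, Any]],
--     contam_horizon: int,
--     z_clear_days: int,
-- ) -> List[bool]:
--     forbid = [False] * int(n)
--     if n <= 0 or not breaks:
--         return forbid
--
--     ch = max(int(contam_horizon), 0)
--     zc = max(int(z_clear_days), 0)
--
--     for b in breaks:
--         try:
--             bi = int(b["idx"])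
--         except Exception:
--             continue
--         lo = max(bi - ch, 0)
--         hi = min(bi + zc - 1, n - 1)
--         for i in range(lo, hi + 1):
--             forbid[i] = True
--     return forbid
-- ===== SOURCE B (Python) =====
-- from typing import Any, Dict, List
--
-- def build_entry_forbidden_mask(
--     n: int,
--     breaks: List[Dict[str, Any]],
--     contam_horizon: int,
--     z_clear_days: int,
-- ) -> List[bool]:
--     n = int(n)
--     if n <= 0:
--         return []
--     ch = max(int(contam_horizon), 0)
--     zc = max(int(z_clear_days), 0)
--     # difference array: +1 at lo, -1 at hi+1; prefix-sum once
--     diff = [0] * (n + 1)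
--     for b in breaks:
--         try:
--             bi = int(b["idx"])
--         except Exception:
--             continue
--         lo = max(bi - ch, 0)
--         hi = min(bi + zc - 1, n - 1)
--         if lo <= hi:
--             diff[lo] += 1
--             diff[hi + 1] -= 1
--     mask = []
--     acc = 0
--     for d in diff[:n]:
--         acc += d
--         mask.append(acc > 0)
--     return mask
-- ===== Notes on version B (the rewrite author's own statement) =====
-- stated objective: alternative
-- what changed: Replaces per-break marking of every index in [lo,hi] with a difference array (+1 at lo, -1 at hi+1) followed by one prefix-sum pass producing the boolean mask.
import Mathlib
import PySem

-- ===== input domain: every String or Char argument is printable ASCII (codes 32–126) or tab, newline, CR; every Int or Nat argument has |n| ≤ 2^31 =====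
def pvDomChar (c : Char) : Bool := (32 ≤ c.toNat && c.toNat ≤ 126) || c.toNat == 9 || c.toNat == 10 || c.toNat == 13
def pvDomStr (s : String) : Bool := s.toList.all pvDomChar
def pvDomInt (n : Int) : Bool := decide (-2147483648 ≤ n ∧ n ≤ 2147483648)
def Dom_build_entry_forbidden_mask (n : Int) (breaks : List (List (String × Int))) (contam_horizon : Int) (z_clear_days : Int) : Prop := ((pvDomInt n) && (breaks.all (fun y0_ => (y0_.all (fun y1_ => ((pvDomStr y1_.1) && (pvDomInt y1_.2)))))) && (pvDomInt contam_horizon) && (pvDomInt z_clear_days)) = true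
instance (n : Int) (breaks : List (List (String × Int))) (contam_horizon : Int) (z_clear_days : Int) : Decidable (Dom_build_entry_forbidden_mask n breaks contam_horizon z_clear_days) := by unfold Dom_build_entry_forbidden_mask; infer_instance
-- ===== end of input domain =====

-- B replaces A's per-break inner marking loop by a difference array and one prefix-sum pass (an alternative algorithm).

-- ===== PORT A =====
-- inner loop 'for i in range(lo, hi+1): forbid[i] = True'; indices are provably in range,
-- so 'forbid[i] = True' is List.set i.toNat true (exact here: Python never raises on this loop)
def pvMark (m : List Bool) (lo hi : Int) : List Bool :=
  (PySem.List.pyRange lo (hi + 1) 1).foldl (fun m i => m.set i.toNat true) m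

def build_entry_forbidden_mask (n : Int) (breaks : List (List (String × Int))) (contam_horizon : Int) (z_clear_days : Int) : List Bool :=
  let forbid := List.replicate n.toNat false
  if n ≤ 0 ∨ breaks = [] then forbid
  else
    let ch := max contam_horizon 0
    let zc := max z_clear_days 0
    breaks.foldl (fun m b =>
      match List.lookup "idx" b with   -- b["idx"]; KeyError → except → continue
      | none => m
      | some bi => pvMark m (max (bi - ch) 0) (min (bi + zc - 1) (n - 1))) forbid

-- ===== PORT B =====
-- prefix-sum loop 'for d in diff[:n]: acc += d; mask.append(acc > 0)'
def pvPrefixMask : List Int → Int → List Bool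
  | [], _ => []
  | d :: t, acc => (decide (0 < acc + d)) :: pvPrefixMask t (acc + d)

def build_entry_forbidden_mask_alt (n : Int) (breaks : List (List (String × Int))) (contam_horizon : Int) (z_clear_days : Int) : List Bool :=
  if n ≤ 0 then []
  else
    let ch := max contam_horizon 0
    let zc := max z_clear_days 0
    -- 'diff[lo] += 1; diff[hi+1] -= 1'; indices provably in range, so set/getD are exact here
    let diff := breaks.foldl (fun (d : List Int) b =>
      match List.lookup "idx" b with
      | none => d
      | some bi =>
        let lo := max (bi - ch) 0
        let hi := min (bi + zc - 1) (n - 1)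
        if lo ≤ hi then
          let d1 := d.set lo.toNat (d.getD lo.toNat 0 + 1)
          d1.set (hi + 1).toNat (d1.getD (hi + 1).toNat 0 - 1)
        else d) (List.replicate (n.toNat + 1) (0:Int))
    pvPrefixMask (diff.take n.toNat) 0

-- ===== PRECONDITION & SPEC =====
def Spec_build_entry_forbidden_mask (n : Int) (breaks : List (List (String × Int))) (contam_horizon : Int) (z_clear_days : Int) (out : List Bool) : Prop := out = build_entry_forbidden_mask_alt n breaks contam_horizon z_clear_days
instance (n : Int) (breaks : List (List (String × Int))) (contam_horizon : Int) (z_clear_days : Int) (out : List Bool) : Decidable (Spec_build_entry_forbidden_mask n breaks contam_horizon z_clear_days out) := by unfold Spec_build_entry_forbidden_mask; infer_instance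

-- ===== CLAIM (what is proved, stated in full; the proofs are below) =====
def Claim_equal_build_entry_forbidden_mask : Prop := ∀ (n : Int) (breaks : List (List (String × Int))) (contam_horizon : Int) (z_clear_days : Int), Dom_build_entry_forbidden_mask n breaks contam_horizon z_clear_days → Spec_build_entry_forbidden_mask n breaks contam_horizon z_clear_days (build_entry_forbidden_mask n breaks contam_horizon z_clear_days)

-- ===== LEMMAS AND PROOFS =====

-- j-th day is hit by break b
def pvHit (n ch zc : Int) (j : Nat) (b : List (String × Int)) : Bool :=
  match List.lookup "idx" b with
  | none => false
  | some bi => decide (max (bi - ch) 0 ≤ (j:Int) ∧ (j:Int) ≤ min (bi + zc - 1) (n - 1))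

-- per-break contribution to the difference array at slot k
def pvDlt (n ch zc : Int) (b : List (String × Int)) (k : Nat) : Int :=
  match List.lookup "idx" b with
  | none => 0
  | some bi =>
    if max (bi - ch) 0 ≤ min (bi + zc - 1) (n - 1) then
      (if (k:Int) = max (bi - ch) 0 then 1 else 0) +
      (if (k:Int) = min (bi + zc - 1) (n - 1) + 1 then -1 else 0)
    else 0

def pvSum (bs : List (List (String × Int))) (n ch zc : Int) (k : Nat) : Int :=
  (bs.map (fun b => pvDlt n ch zc b k)).sum

def pvS (g : Nat → Int) : Nat → Int
  | 0 => 0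
  | m+1 => pvS g m + g m

-- the two loop bodies, named (definitionally equal to the lambdas in the ports)
def pvStepA (n ch zc : Int) (m : List Bool) (b : List (String × Int)) : List Bool :=
  match List.lookup "idx" b with
  | none => m
  | some bi => pvMark m (max (bi - ch) 0) (min (bi + zc - 1) (n - 1))

def pvStepB (n ch zc : Int) (d : List Int) (b : List (String × Int)) : List Int :=
  match List.lookup "idx" b with
  | none => d
  | some bi =>
    let lo := max (bi - ch) 0
    let hi := min (bi + zc - 1) (n - 1)
    if lo ≤ hi then
      let d1 := d.set lo.toNat (d.getD lo.toNat 0 + 1)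
      d1.set (hi + 1).toNat (d1.getD (hi + 1).toNat 0 - 1)
    else d

theorem pv_repmap {α : Type} (m : Nat) (c : α) :
    List.replicate m c = (List.range m).map (fun _ => c) := by
  rw [List.map_const', List.length_range]

theorem pv_setmap {α : Type} (m : Nat) (f : Nat → α) (k : Nat) (v : α) :
    ((List.range m).map f).set k v
      = (List.range m).map (fun j => if j = k then v else f j) := by
  apply List.ext_getElem
  · simp
  · intro i h1 h2
    simp only [List.getElem_set, List.getElem_map, List.getElem_range]
    rcases eq_or_ne i k with h | h
    · simp [h]
    · simp [h, Ne.symm h]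

theorem pv_foldset (is : List Int) (m : Nat) (f : Nat → Bool)
    (hnn : ∀ i ∈ is, 0 ≤ i) :
    is.foldl (fun acc i => acc.set i.toNat true) ((List.range m).map f)
      = (List.range m).map (fun j => f j || is.any (fun i => i == (j:Int))) := by
  induction is generalizing f with
  | nil => simp
  | cons i t ih =>
    have hi : 0 ≤ i := hnn i (by simp)
    simp only [List.foldl_cons]
    rw [pv_setmap, ih _ (fun x hx => hnn x (by simp [hx]))]
    apply List.map_congr_left
    intro j _
    rcases eq_or_ne j i.toNat with h | h
    · subst h
      have hbeq : (i == ((i.toNat : Nat) : Int)) = true := by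
        simp only [beq_iff_eq]; omega
      rw [if_pos rfl, Bool.true_or, List.any_cons, hbeq, Bool.true_or, Bool.or_true]
    · have hbeq : (i == (j:Int)) = false := by
        simp only [beq_eq_false_iff_ne, ne_eq]; omega
      rw [if_neg h, List.any_cons, hbeq, Bool.false_or]

theorem pv_mark (m : Nat) (f : Nat → Bool) (lo hi : Int) (hlo : 0 ≤ lo) :
    pvMark ((List.range m).map f) lo hi
      = (List.range m).map (fun j => f j || decide (lo ≤ (j:Int) ∧ (j:Int) ≤ hi)) := by
  unfold pvMark
  rw [pv_foldset _ m f (by intro i hi'; have := (PySem.List.mem_pyRange_one).mp hi'; omega)]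
  apply List.map_congr_left
  intro j _
  congr 1
  rcases Decidable.em (lo ≤ (j:Int) ∧ (j:Int) ≤ hi) with h | h
  · have hmem : ((j:Int)) ∈ PySem.List.pyRange lo (hi + 1) 1 := by
      rw [PySem.List.mem_pyRange_one]; omega
    have h2 : (PySem.List.pyRange lo (hi + 1) 1).any (fun i => i == (j:Int)) = true := by
      rw [List.any_eq_true]; exact ⟨(j:Int), hmem, by simp⟩
    rw [h2, decide_eq_true h]
  · have hno : ((j:Int)) ∉ PySem.List.pyRange lo (hi + 1) 1 := by
      rw [PySem.List.mem_pyRange_one]; omega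
    have h2 : (PySem.List.pyRange lo (hi + 1) 1).any (fun i => i == (j:Int)) = false := by
      rw [List.any_eq_false]
      intro x hx
      simp only [beq_iff_eq]
      intro he; exact hno (he ▸ hx)
    rw [h2, decide_eq_false h]

theorem pv_stepA_none (n ch zc : Int) (m : List Bool) (b : List (String × Int))
    (hb : List.lookup "idx" b = none) : pvStepA n ch zc m b = m := by
  unfold pvStepA; rw [hb]

theorem pv_stepA_some (n ch zc : Int) (m : List Bool) (b : List (String × Int)) (bi : Int)
    (hb : List.lookup "idx" b = some bi) :
    pvStepA n ch zc m b = pvMark m (max (bi - ch) 0) (min (bi + zc - 1) (n - 1)) := by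
  unfold pvStepA; rw [hb]

theorem pv_Afold (bs : List (List (String × Int))) (M : Nat) (f : Nat → Bool)
    (n ch zc : Int) :
    bs.foldl (pvStepA n ch zc) ((List.range M).map f)
      = (List.range M).map (fun j => f j || bs.any (pvHit n ch zc j)) := by
  induction bs generalizing f with
  | nil => simp
  | cons b t ih =>
    simp only [List.foldl_cons]
    rcases hb : List.lookup "idx" b with _ | bi
    · rw [pv_stepA_none n ch zc _ b hb, ih]
      apply List.map_congr_left
      intro j _
      simp [pvHit, hb]
    · rw [pv_stepA_some n ch zc _ b bi hb, pv_mark M f _ _ (le_max_right _ _), ih]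
      apply List.map_congr_left
      intro j _
      simp [pvHit, hb, Bool.or_assoc]

-- A computes: day j forbidden iff some break hits it
theorem pv_A_char (n : Int) (breaks : List (List (String × Int))) (ch0 zc0 : Int) :
    build_entry_forbidden_mask n breaks ch0 zc0
      = (List.range n.toNat).map
          (fun j => breaks.any (pvHit n (max ch0 0) (max zc0 0) j)) := by
  show (if n ≤ 0 ∨ breaks = [] then List.replicate n.toNat false
        else breaks.foldl (pvStepA n (max ch0 0) (max zc0 0)) (List.replicate n.toNat false)) = _
  split
  · rename_i h
    rcases h with h | h
    · have h0 : n.toNat = 0 := by omega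
      rw [h0]
      rfl
    · subst h
      exact pv_repmap n.toNat false
  · rw [pv_repmap, pv_Afold breaks n.toNat (fun _ => false) n (max ch0 0) (max zc0 0)]
    apply List.map_congr_left
    intro j _
    rw [Bool.false_or]

theorem pv_getDmap (m : Nat) (g : Nat → Int) (k : Nat) (hk : k < m) :
    ((List.range m).map g).getD k 0 = g k := by
  rw [List.getD_eq_getElem?_getD]
  simp [hk]

theorem pv_Bstep (n ch zc : Int) (g : Nat → Int) (b : List (String × Int)) (hn : 0 < n) :
    pvStepB n ch zc ((List.range (n.toNat + 1)).map g) b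
      = (List.range (n.toNat + 1)).map (fun k => g k + pvDlt n ch zc b k) := by
  unfold pvStepB
  rcases hb : List.lookup "idx" b with _ | bi
  · apply List.map_congr_left
    intro k _
    simp [pvDlt, hb]
  · simp only []
    set lo := max (bi - ch) 0 with hlo
    set hi := min (bi + zc - 1) (n - 1) with hhi
    have h0lo : 0 ≤ lo := le_max_right _ _
    rcases Decidable.em (lo ≤ hi) with hle | hle
    · have hhin : hi ≤ n - 1 := min_le_right _ _
      have hlt1 : lo.toNat < n.toNat + 1 := by omega
      have hlt2 : (hi + 1).toNat < n.toNat + 1 := by omega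
      have hne : lo.toNat ≠ (hi + 1).toNat := by omega
      rw [if_pos hle, pv_getDmap _ g _ hlt1, pv_setmap, pv_getDmap _ _ _ hlt2, pv_setmap]
      apply List.map_congr_left
      intro k hk
      simp only [List.mem_range] at hk
      simp only [pvDlt, hb, if_pos hle, ← hlo, ← hhi]
      rcases eq_or_ne k (hi + 1).toNat with h1 | h1
      · subst h1
        rw [if_pos rfl, if_neg (Ne.symm hne)]
        have e1 : ¬((((hi + 1).toNat : Nat) : Int) = lo) := by omega
        have e2 : ((((hi + 1).toNat : Nat) : Int) = hi + 1) := by omega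
        rw [if_neg e1, if_pos e2]
        ring
      · rw [if_neg h1]
        rcases eq_or_ne k lo.toNat with h2 | h2
        · subst h2
          rw [if_pos rfl]
          have e1 : (((lo.toNat : Nat) : Int) = lo) := by omega
          have e2 : ¬(((lo.toNat : Nat) : Int) = hi + 1) := by omega
          rw [if_pos e1, if_neg e2]
          ring
        · rw [if_neg h2]
          have e1 : ¬((k : Int) = lo) := by omega
          have e2 : ¬((k : Int) = hi + 1) := by omega
          rw [if_neg e1, if_neg e2]
          ring
    · rw [if_neg hle]
      apply List.map_congr_left
      intro k _
      simp [pvDlt, hb, ← hlo, ← hhi, hle]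

theorem pv_Bfold (bs : List (List (String × Int))) (n ch zc : Int) (g : Nat → Int)
    (hn : 0 < n) :
    bs.foldl (pvStepB n ch zc) ((List.range (n.toNat + 1)).map g)
      = (List.range (n.toNat + 1)).map (fun k => g k + pvSum bs n ch zc k) := by
  induction bs generalizing g with
  | nil => simp [pvSum]
  | cons b t ih =>
    simp only [List.foldl_cons]
    rw [pv_Bstep n ch zc g b hn, ih]
    apply List.map_congr_left
    intro k _
    simp [pvSum, add_assoc]

theorem pv_prefix (M : Nat) (g : Nat → Int) :
    ∀ a : Nat, pvPrefixMask ((List.range M).map (fun k => g (a + k))) (pvS g a)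
      = (List.range M).map (fun j => decide (0 < pvS g (a + j + 1))) := by
  induction M with
  | zero => intro a; rfl
  | succ M ih =>
    intro a
    rw [List.range_succ_eq_map]
    simp only [List.map_cons, List.map_map, pvPrefixMask]
    have hacc : pvS g a + g (a + 0) = pvS g (a + 1) := by simp [pvS]
    congr 1
    rw [hacc]
    have hmaps : ((fun k => g (a + k)) ∘ Nat.succ) = fun k => g ((a + 1) + k) := by
      funext k
      simp only [Function.comp_apply]
      congr 1
      omega
    rw [hmaps, ih (a + 1)]
    apply List.ext_getElem (by simp)
    intro i h1 h2
    simp only [List.getElem_map, List.getElem_range, Function.comp_apply]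
    have h3 : a + 1 + i + 1 = a + i.succ + 1 := by omega
    rw [h3]

theorem pv_prefix0 (M : Nat) (g : Nat → Int) :
    pvPrefixMask ((List.range M).map g) 0
      = (List.range M).map (fun j => decide (0 < pvS g (j + 1))) := by
  have h := pv_prefix M g 0
  have h1 : (fun k => g (0 + k)) = g := by funext k; rw [Nat.zero_add]
  rw [h1, show pvS g 0 = 0 from rfl] at h
  rw [h]
  apply List.map_congr_left
  intro j _
  have : 0 + j + 1 = j + 1 := by omega
  rw [this]

theorem pv_S_add (g1 g2 : Nat → Int) (m : Nat) :
    pvS (fun k => g1 k + g2 k) m = pvS g1 m + pvS g2 m := by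
  induction m with
  | zero => rfl
  | succ m ih => simp only [pvS, ih]; ring

theorem pv_S_zero (m : Nat) : pvS (fun _ => (0:Int)) m = 0 := by
  induction m with
  | zero => rfl
  | succ m ih => simp [pvS, ih]

theorem pv_S_congr (g1 g2 : Nat → Int) (m : Nat) (h : ∀ k, g1 k = g2 k) :
    pvS g1 m = pvS g2 m := by
  induction m with
  | zero => rfl
  | succ m ih => simp [pvS, ih, h m]

theorem pv_S_ite (c v : Int) (m : Nat) :
    pvS (fun k => if (k:Int) = c then v else 0) m
      = if 0 ≤ c ∧ c < (m:Int) then v else 0 := by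
  induction m with
  | zero =>
    rw [if_neg (by omega : ¬(0 ≤ c ∧ c < ((0:Nat):Int)))]
    rfl
  | succ m ih =>
    simp only [pvS, ih]
    push_cast
    split_ifs <;> omega

theorem pv_S_dlt (n ch zc : Int) (b : List (String × Int)) (j : Nat) :
    pvS (pvDlt n ch zc b) (j + 1) = if pvHit n ch zc j b then (1:Int) else 0 := by
  rcases hb : List.lookup "idx" b with _ | bi
  · rw [pv_S_congr _ (fun _ => 0) _ (by intro k; simp [pvDlt, hb]), pv_S_zero]
    simp [pvHit, hb]
  · set lo := max (bi - ch) 0 with hlo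
    set hi := min (bi + zc - 1) (n - 1) with hhi
    have h0lo : 0 ≤ lo := le_max_right _ _
    rcases Decidable.em (lo ≤ hi) with hle | hle
    · rw [pv_S_congr _ (fun k => (if (k:Int) = lo then 1 else 0) + (if (k:Int) = hi + 1 then -1 else 0)) _
        (by intro k; simp [pvDlt, hb, ← hlo, ← hhi, hle]),
        pv_S_add, pv_S_ite, pv_S_ite]
      simp only [pvHit, hb, ← hlo, ← hhi]
      push_cast
      split_ifs <;> simp_all <;> omega
    · rw [pv_S_congr _ (fun _ => 0) _ (by intro k; simp [pvDlt, hb, ← hlo, ← hhi, hle]), pv_S_zero]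
      simp only [pvHit, hb, ← hlo, ← hhi]
      split_ifs with h
      · simp only [decide_eq_true_eq] at h; omega
      · rfl

theorem pv_sum_nonneg (n ch zc : Int) (j : Nat) (bs : List (List (String × Int))) :
    0 ≤ (bs.map (fun b => if pvHit n ch zc j b then (1:Int) else 0)).sum := by
  induction bs with
  | nil => simp
  | cons b t ih => simp only [List.map_cons, List.sum_cons]; split_ifs <;> omega

theorem pv_sum_pos (n ch zc : Int) (j : Nat) (bs : List (List (String × Int))) :
    decide (0 < (bs.map (fun b => if pvHit n ch zc j b then (1:Int) else 0)).sum)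
      = bs.any (pvHit n ch zc j) := by
  induction bs with
  | nil => simp
  | cons b t ih =>
    have ht := pv_sum_nonneg n ch zc j t
    rw [List.map_cons, List.sum_cons, List.any_cons]
    by_cases hbv : pvHit n ch zc j b = true
    · have h1 : (if pvHit n ch zc j b = true then (1:Int) else 0) = 1 := if_pos hbv
      rw [h1, hbv, Bool.true_or]
      exact decide_eq_true (by omega)
    · have h1 : (if pvHit n ch zc j b = true then (1:Int) else 0) = 0 := if_neg hbv
      rw [h1, zero_add]
      simp only [Bool.not_eq_true] at hbv
      rw [hbv, Bool.false_or]
      exact ih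

theorem pv_S_sum (bs : List (List (String × Int))) (n ch zc : Int) (m : Nat) :
    pvS (pvSum bs n ch zc) m = (bs.map (fun b => pvS (pvDlt n ch zc b) m)).sum := by
  induction bs with
  | nil =>
    have h := pv_S_congr (pvSum [] n ch zc) (fun _ => (0:Int)) m (fun k => by simp [pvSum])
    rw [h, pv_S_zero]
    rfl
  | cons b t ih =>
    have h := pv_S_congr (pvSum (b :: t) n ch zc)
      (fun k => pvDlt n ch zc b k + pvSum t n ch zc k) m (fun k => by simp [pvSum])
    rw [h, pv_S_add, ih, List.map_cons, List.sum_cons]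

-- B computes the same characterisation
theorem pv_B_char (n : Int) (breaks : List (List (String × Int))) (ch0 zc0 : Int) :
    build_entry_forbidden_mask_alt n breaks ch0 zc0
      = (List.range n.toNat).map
          (fun j => breaks.any (pvHit n (max ch0 0) (max zc0 0) j)) := by
  show (if n ≤ 0 then []
        else pvPrefixMask
          ((breaks.foldl (pvStepB n (max ch0 0) (max zc0 0))
              (List.replicate (n.toNat + 1) (0:Int))).take n.toNat) 0) = _
  split
  · rename_i h
    have h0 : n.toNat = 0 := by omega
    rw [h0]
    rfl
  · rename_i h
    have hn : 0 < n := by omega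
    rw [pv_repmap, pv_Bfold breaks n (max ch0 0) (max zc0 0) (fun _ => 0) hn]
    have htake : (((List.range (n.toNat + 1)).map
        (fun k => (0:Int) + pvSum breaks n (max ch0 0) (max zc0 0) k)).take n.toNat)
        = (List.range n.toNat).map (fun k => pvSum breaks n (max ch0 0) (max zc0 0) k) := by
      rw [← List.map_take, List.take_range]
      have hmin : min n.toNat (n.toNat + 1) = n.toNat := by omega
      rw [hmin]
      apply List.map_congr_left
      intro k _
      rw [zero_add]
    rw [htake, pv_prefix0 n.toNat (pvSum breaks n (max ch0 0) (max zc0 0))]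
    apply List.map_congr_left
    intro j _
    have hS : pvS (pvSum breaks n (max ch0 0) (max zc0 0)) (j + 1)
        = (breaks.map (fun b => if pvHit n (max ch0 0) (max zc0 0) j b then (1:Int) else 0)).sum := by
      rw [pv_S_sum breaks n (max ch0 0) (max zc0 0) (j + 1)]
      congr 1
      apply List.map_congr_left
      intro b _
      exact pv_S_dlt n (max ch0 0) (max zc0 0) b j
    rw [hS, pv_sum_pos]

-- ===== VERDICT (by name: the statement is the Claim_ definition above) =====
theorem build_entry_forbidden_mask_spec : Claim_equal_build_entry_forbidden_mask := by
  intro n breaks ch0 zc0 _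
  unfold Spec_build_entry_forbidden_mask
  rw [pv_A_char, pv_B_char]
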